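-- pv_equiv track=rewrite | github.com/rocket3989/hackerEarth2019 | august circuits/special.py | count
-- ===== SOURCE A (Python) =====
-- lookup = {x: {str(y) for y in range(10) if y % x == 0} for x in range(1, 10)}
--
-- def count(n, k):
--     index = 0
--     for i, num in enumerate(reversed(str(n))):
--         count = 0
--         for j in range(10):
--             if j % k == 0:
--                 count += 1
--
--             if str(j) == num:
--                 index += (count - 1) * (len(lookup[k]) ** i)
--                 break
--
--     return index
-- ===== SOURCE B (Python) =====
-- lookup = {x: {str(y) for y in range(10) if y % x == 0} for x in range(1, 10)}
--
-- def count(n, k):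
--     base = 9 // k + 1
--     total = 0
--     for i, ch in enumerate(reversed(str(n))):
--         if ch.isdigit():
--             total += (int(ch) // k) * base ** i
--     return total
-- ===== Notes on version B (the rewrite author's own statement) =====
-- stated objective: simpler
-- what changed: Replaces A's per-digit inner scan of range(10) (counting divisible digits until the matching one, with the base read off a precomputed dict of sets) by closed forms: the coefficient of digit d is d // k and the base is 9 // k + 1, leaving a single arithmetic pass over the digits.
import Mathlib
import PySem

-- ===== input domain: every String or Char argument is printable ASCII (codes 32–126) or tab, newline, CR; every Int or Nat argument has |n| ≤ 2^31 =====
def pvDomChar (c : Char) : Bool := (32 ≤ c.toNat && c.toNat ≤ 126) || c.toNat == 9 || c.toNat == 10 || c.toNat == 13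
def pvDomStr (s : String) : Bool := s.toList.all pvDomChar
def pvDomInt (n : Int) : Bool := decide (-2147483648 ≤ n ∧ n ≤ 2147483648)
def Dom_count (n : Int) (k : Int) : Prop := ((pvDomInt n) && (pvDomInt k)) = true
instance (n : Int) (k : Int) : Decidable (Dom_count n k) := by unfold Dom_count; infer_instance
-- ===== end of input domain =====

-- B replaces A's per-digit scan of range(10) and dict-of-sets base by the closed forms d // k and 9 // k + 1 (objective: simpler).

-- ===== PORT A =====
-- lookup = {x: {str(y) for y in range(10) if y % x == 0} for x in range(1, 10)}
def lookupA : PySem.Dict Int (PySem.Set String) :=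
  (PySem.List.pyRange 1 10 1).foldl
    (fun d x => d.insert x (PySem.Set.ofList
      (((PySem.List.pyRange 0 10 1).filter (fun y => PySem.Int.mod y x == 0)).map PySem.Int.toStr)))
    PySem.Dict.empty

-- len(lookup[k]); Python raises KeyError when k ∉ lookup — Pre_count excludes those k, the default is never read there
def lookupLenA (k : Int) : Int := ((lookupA.getD k (PySem.Set.ofList [])).length : Int)

-- the inner 'for j in range(10)' with its running count and break
def countInnerA (k : Int) (num : String) (i : Nat) : List Int → Int → Int → Int
  | [], _count, index => index
  | j :: js, count, index =>
    let count' := if PySem.Int.mod j k == 0 then count + 1 else count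
    if PySem.Int.toStr j == num then index + (count' - 1) * (lookupLenA k) ^ i
    else countInnerA k num i js count' index

def count (n : Int) (k : Int) : Int :=
  (PySem.List.enumerate ((PySem.Int.toStr n).toList.reverse)).foldl
    (fun index p => countInnerA k (String.ofList [p.2]) p.1.toNat (PySem.List.pyRange 0 10 1) 0 index) 0

-- ===== PORT B =====
def count_alt (n : Int) (k : Int) : Int :=
  let base := PySem.Int.floordiv 9 k + 1
  (PySem.List.enumerate ((PySem.Int.toStr n).toList.reverse)).foldl
    (fun total p =>
      if PySem.Chars.isdigit p.2 then
        total + PySem.Int.floordiv ((PySem.Int.ofStr? (String.ofList [p.2])).getD 0) k * base ^ p.1.toNat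
      else total) 0

-- ===== PRECONDITION & SPEC =====
-- Pre_count: A raises for k outside 1..9 (ZeroDivisionError for k == 0, KeyError otherwise); it returns on every other input.
def Pre_count (n : Int) (k : Int) : Prop := 1 ≤ k ∧ k ≤ 9
instance (n : Int) (k : Int) : Decidable (Pre_count n k) := by unfold Pre_count; infer_instance
def pvWitness_count : Int × Int := (207, 3)
def Spec_count (n : Int) (k : Int) (out : Int) : Prop := out = count_alt n k
instance (n : Int) (k : Int) (out : Int) : Decidable (Spec_count n k out) := by unfold Spec_count; infer_instance

-- ===== CLAIM (what is proved, stated in full; the proofs are below) =====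
def Claim_equal_count : Prop := ∀ (n : Int) (k : Int), Dom_count n k → Pre_count n k → Spec_count n k (count n k)


-- ===== LEMMAS AND PROOFS =====

-- the break-free coefficient A's inner scan computes: (count-1) at the matching digit, 0 if none matches
def coefA (k : Int) (num : String) : List Int → Int → Int
  | [], _count => 0
  | j :: js, count =>
    let count' := if PySem.Int.mod j k == 0 then count + 1 else count
    if PySem.Int.toStr j == num then count' - 1 else coefA k num js count'

lemma countInnerA_eq (k : Int) (num : String) (i : Nat) (js : List Int) (count index : Int) :
    countInnerA k num i js count index = index + coefA k num js count * (lookupLenA k) ^ i := by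
  induction js generalizing count with
  | nil => simp [countInnerA, coefA]
  | cons j js ih =>
    simp only [countInnerA, coefA]
    split_ifs <;> first | rfl | apply ih

lemma beq_single_false (c d : Char) (h : ¬ c = d) :
    (String.ofList [d] == String.ofList [c]) = false := by
  simp [String.ofList_inj]
  exact fun hh => h hh.symm

lemma mem_digits_of_isdigit (c : Char) (h : PySem.Chars.isdigit c = true) :
    c ∈ ['0','1','2','3','4','5','6','7','8','9'] := by
  simp [PySem.Chars.isdigit, Char.le_def] at h
  obtain ⟨h1, h2⟩ := h
  have h1' : 48 ≤ c.toNat := by exact_mod_cast h1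
  have h2' : c.toNat ≤ 57 := by exact_mod_cast h2
  rw [← Char.ofNat_toNat c]
  interval_cases hc : c.toNat <;> decide

lemma coef_nodigit (k : Int) (c : Char) (hd : PySem.Chars.isdigit c = false) :
    coefA k (String.ofList [c]) [0,1,2,3,4,5,6,7,8,9] 0 = 0 := by
  have hne : ∀ d : Char, PySem.Chars.isdigit d = true → ¬ c = d := by
    intro d hdig he; rw [he, hdig] at hd; cases hd
  simp only [coefA,
    show PySem.Int.toStr 0 = String.ofList ['0'] from by decide,
    show PySem.Int.toStr 1 = String.ofList ['1'] from by decide,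
    show PySem.Int.toStr 2 = String.ofList ['2'] from by decide,
    show PySem.Int.toStr 3 = String.ofList ['3'] from by decide,
    show PySem.Int.toStr 4 = String.ofList ['4'] from by decide,
    show PySem.Int.toStr 5 = String.ofList ['5'] from by decide,
    show PySem.Int.toStr 6 = String.ofList ['6'] from by decide,
    show PySem.Int.toStr 7 = String.ofList ['7'] from by decide,
    show PySem.Int.toStr 8 = String.ofList ['8'] from by decide,
    show PySem.Int.toStr 9 = String.ofList ['9'] from by decide,
    beq_single_false c '0' (hne '0' (by decide)),
    beq_single_false c '1' (hne '1' (by decide)),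
    beq_single_false c '2' (hne '2' (by decide)),
    beq_single_false c '3' (hne '3' (by decide)),
    beq_single_false c '4' (hne '4' (by decide)),
    beq_single_false c '5' (hne '5' (by decide)),
    beq_single_false c '6' (hne '6' (by decide)),
    beq_single_false c '7' (hne '7' (by decide)),
    beq_single_false c '8' (hne '8' (by decide)),
    beq_single_false c '9' (hne '9' (by decide)),
    Bool.false_eq_true, if_false]

lemma lookupLenA_eq (k : Int) (h1 : 1 ≤ k) (h9 : k ≤ 9) :
    lookupLenA k = PySem.Int.floordiv 9 k + 1 := by
  interval_cases k <;> decide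

lemma coef_digit (k : Int) (hk1 : 1 ≤ k) (hk9 : k ≤ 9) (c : Char)
    (hd : PySem.Chars.isdigit c = true) :
    coefA k (String.ofList [c]) [0,1,2,3,4,5,6,7,8,9] 0
      = PySem.Int.floordiv ((PySem.Int.ofStr? (String.ofList [c])).getD 0) k := by
  have hc := mem_digits_of_isdigit c hd
  fin_cases hc <;> (interval_cases k <;> decide)

-- one step: A's inner scan with break equals B's closed-form contribution, any char, any place
lemma step_eq (k : Int) (hk1 : 1 ≤ k) (hk9 : k ≤ 9) (c : Char) (i : Nat) (index : Int) :
    countInnerA k (String.ofList [c]) i (PySem.List.pyRange 0 10 1) 0 index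
      = if PySem.Chars.isdigit c then
          index + PySem.Int.floordiv ((PySem.Int.ofStr? (String.ofList [c])).getD 0) k
                    * (PySem.Int.floordiv 9 k + 1) ^ i
        else index := by
  rw [show PySem.List.pyRange 0 10 1 = [0,1,2,3,4,5,6,7,8,9] from by decide,
      countInnerA_eq, lookupLenA_eq k hk1 hk9]
  by_cases hd : PySem.Chars.isdigit c = true
  · rw [if_pos hd, coef_digit k hk1 hk9 c hd]
  · rw [if_neg hd, coef_nodigit k c (Bool.not_eq_true _ ▸ hd), zero_mul, add_zero]

-- ===== VERDICT (by name: the statement is the Claim_ definition above) =====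
theorem count_spec : Claim_equal_count := by
  intro n k _ hpre
  unfold Spec_count count count_alt
  apply PySem.List.foldl_congr_mem
  intro acc p _
  exact step_eq k hpre.1 hpre.2 p.2 p.1.toNat acc
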